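-- pv_equiv track=rewrite | github.com/mhhokama/from-illusion-to-insight | src/sdp/analysis/java_parse.py | expand_call_graph
-- ===== SOURCE A (Python) =====
-- from collections import defaultdict, deque
-- from typing import Dict, Tuple, List, Set
--
-- def expand_call_graph(context_methods: Set[str], calls: Dict[str, Set[str]], methods: Dict[str, Tuple[str, int, int, str]], depth: int) -> Set[str]:
--     queue = deque([(m, 0) for m in context_methods])
--     visited = set(context_methods)
--
--     while queue:
--         method_name, level = queue.popleft()
--         if level >= depth:
--             continue
--         for callee in calls.get(method_name, set()):
--             if callee in visited:
--                 continue
--             if any(val[0] == callee for val in methods.values()):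
--                 visited.add(callee)
--                 queue.append((callee, level + 1))
--         for caller, callees in calls.items():
--             if method_name in callees and caller not in visited:
--                 visited.add(caller)
--                 queue.append((caller, level + 1))
--
--     return visited
-- ===== SOURCE B (Python) =====
-- def expand_call_graph(context_methods, calls, methods, depth):
--     # Level-synchronous expansion: recursion over rounds with an explicit
--     # frontier list (no deque, no per-node level tags), with the method-name
--     # set and a reverse callee->callers map precomputed so a round does no
--     # scan over methods or over calls.items().
--     method_names = {v[0] for v in methods.values()}
--     callers_of = {}
--     for caller, callees in calls.items():
--         for c in callees:
--             callers_of.setdefault(c, []).append(caller)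
--
--     visited = set(context_methods)
--
--     def grow(frontier, remaining):
--         if remaining <= 0 or not frontier:
--             return
--         nxt = []
--         for m in frontier:
--             for c in calls.get(m, ()):
--                 if c not in visited and c in method_names:
--                     visited.add(c)
--                     nxt.append(c)
--             for caller in callers_of.get(m, ()):
--                 if caller not in visited:
--                     visited.add(caller)
--                     nxt.append(caller)
--         grow(nxt, remaining - 1)
--
--     grow(list(context_methods), depth)
--     return visited
-- ===== Notes on version B (the rewrite author's own statement) =====
-- stated objective: faster
-- what changed: B replaces A's deque-of-(node,level) BFS by a level-synchronous recursion over explicit frontier lists (one round per depth level, no queue and no per-node level tags), and precomputes the method-name set and a reverse callee->callers map so a round performs no scan over methods or calls.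
import Mathlib
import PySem

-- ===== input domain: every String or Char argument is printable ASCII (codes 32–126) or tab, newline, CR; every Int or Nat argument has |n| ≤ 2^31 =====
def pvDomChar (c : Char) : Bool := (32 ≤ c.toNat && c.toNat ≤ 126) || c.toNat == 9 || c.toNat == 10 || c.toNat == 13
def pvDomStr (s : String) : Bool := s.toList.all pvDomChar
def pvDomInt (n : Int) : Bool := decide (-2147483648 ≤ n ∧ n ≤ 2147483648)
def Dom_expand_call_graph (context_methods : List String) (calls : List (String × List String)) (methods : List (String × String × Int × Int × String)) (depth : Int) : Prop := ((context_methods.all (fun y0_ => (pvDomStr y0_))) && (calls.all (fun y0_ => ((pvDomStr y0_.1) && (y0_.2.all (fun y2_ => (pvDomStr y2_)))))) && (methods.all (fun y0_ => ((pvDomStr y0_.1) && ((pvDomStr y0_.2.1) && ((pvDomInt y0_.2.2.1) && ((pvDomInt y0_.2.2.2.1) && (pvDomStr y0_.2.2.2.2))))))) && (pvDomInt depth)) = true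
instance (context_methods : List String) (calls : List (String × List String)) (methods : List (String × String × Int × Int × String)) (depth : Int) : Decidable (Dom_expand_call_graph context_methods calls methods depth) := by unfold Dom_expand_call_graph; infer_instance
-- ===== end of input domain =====

-- ===== PORT A =====
-- B replaces A's deque BFS with (node, level) tags by a level-synchronous recursion over
-- explicit frontier lists, with the method-name set and a reverse callee->callers map
-- precomputed so a round does no scan over methods or calls (objective: faster).

-- A's inner 'for callee in calls.get(method_name, set())' loop body
def aCalleeStep (methods : List (String × String × Int × Int × String)) (level : Int)
    (s : List String × List (String × Int)) (callee : String) : List String × List (String × Int) :=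
  if PySem.Set.contains s.1 callee then s
  else if methods.any (fun kv => kv.2.1 == callee) then
    (PySem.Set.add s.1 callee, s.2 ++ [(callee, level + 1)])
  else s

-- A's inner 'for caller, callees in calls.items()' loop body
def aCallerStep (method_name : String) (level : Int)
    (s : List String × List (String × Int)) (ck : String × List String) :
    List String × List (String × Int) :=
  if PySem.Set.contains ck.2 method_name && !PySem.Set.contains s.1 ck.1 then
    (PySem.Set.add s.1 ck.1, s.2 ++ [(ck.1, level + 1)])
  else s

-- fuel for the 'while queue:' loop, a totality guard only: every dequeue shortens the queue by
-- one and every enqueue adds a fresh name drawn from 'calls' to 'visited', so the iteration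
-- count stays below this bound (the measure lemmas m2_* below prove it sufficient).
def pvFuel (context_methods : List String) (calls : List (String × List String)) : Nat :=
  context_methods.length + 2 * (calls.flatMap (fun p => p.1 :: p.2)).length + 1

-- A's 'while queue:' loop
def aLoop (calls : List (String × List String)) (methods : List (String × String × Int × Int × String))
    (depth : Int) : Nat → List String → List (String × Int) → List String
  | _, visited, [] => visited
  | 0, visited, _ :: _ => visited
  | fuel + 1, visited, (method_name, level) :: rest =>
    if depth ≤ level then aLoop calls methods depth fuel visited rest
    else
      let s1 := ((PySem.Dict.mk calls).getD method_name []).foldl (aCalleeStep methods level) (visited, rest)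
      let s2 := calls.foldl (aCallerStep method_name level) s1
      aLoop calls methods depth fuel s2.1 s2.2

def expand_call_graph (context_methods : List String) (calls : List (String × List String)) (methods : List (String × String × Int × Int × String)) (depth : Int) : List String :=
  aLoop calls methods depth (pvFuel context_methods calls)
    (PySem.Set.ofList context_methods) (context_methods.map (fun m => (m, (0 : Int))))

-- ===== PORT B =====
-- B's 'for c in calls.get(m, ())' loop body: set-membership tests, no scan over methods
def bCalleeStep (method_names : PySem.Set String)
    (s : List String × List String) (c : String) : List String × List String :=
  if !PySem.Set.contains s.1 c && PySem.Set.contains method_names c then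
    (PySem.Set.add s.1 c, s.2 ++ [c])
  else s

-- B's 'for caller in callers_of.get(m, ())' loop body: the reverse map replaces the scan over calls
def bCallerStep (s : List String × List String) (caller : String) : List String × List String :=
  if !PySem.Set.contains s.1 caller then
    (PySem.Set.add s.1 caller, s.2 ++ [caller])
  else s

-- the body of B's 'for m in frontier' loop: both phases for one frontier node
def bNodeStep (calls : List (String × List String)) (method_names : PySem.Set String)
    (callers_of : PySem.Dict String (List String))
    (s : List String × List String) (m : String) : List String × List String :=
  (callers_of.getD m []).foldl bCallerStep
    (((PySem.Dict.mk calls).getD m []).foldl (bCalleeStep method_names) s)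

-- 'callers_of.setdefault(c, []).append(caller)' = modify c [] (· ++ [caller])
def buildCallersOf (calls : List (String × List String)) : PySem.Dict String (List String) :=
  calls.foldl (fun d p => p.2.foldl (fun d c => d.modify c [] (fun v => v ++ [p.1])) d) PySem.Dict.empty

-- B's recursive 'grow(frontier, remaining)': one call per level, structural on remaining.toNat
def bGrow (calls : List (String × List String)) (method_names : PySem.Set String)
    (callers_of : PySem.Dict String (List String)) :
    Nat → List String → List String → List String
  | 0, visited, _ => visited
  | _ + 1, visited, [] => visited
  | n + 1, visited, m :: fs =>
    let s := (m :: fs).foldl (bNodeStep calls method_names callers_of) (visited, [])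
    bGrow calls method_names callers_of n s.1 s.2

def expand_call_graph_alt (context_methods : List String) (calls : List (String × List String)) (methods : List (String × String × Int × Int × String)) (depth : Int) : List String :=
  let method_names : PySem.Set String := PySem.Set.ofList (methods.map (fun kv => kv.2.1))
  let callers_of := buildCallersOf calls
  bGrow calls method_names callers_of depth.toNat (PySem.Set.ofList context_methods) context_methods

-- ===== PRECONDITION & SPEC =====
def Spec_expand_call_graph (context_methods : List String) (calls : List (String × List String)) (methods : List (String × String × Int × Int × String)) (depth : Int) (out : List String) : Prop := out = expand_call_graph_alt context_methods calls methods depth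
instance (context_methods : List String) (calls : List (String × List String)) (methods : List (String × String × Int × Int × String)) (depth : Int) (out : List String) : Decidable (Spec_expand_call_graph context_methods calls methods depth out) := by unfold Spec_expand_call_graph; infer_instance

-- ===== CLAIM (what is proved, stated in full; the proofs are below) =====
def Claim_equal_expand_call_graph : Prop := ∀ (context_methods : List String) (calls : List (String × List String)) (methods : List (String × String × Int × Int × String)) (depth : Int), Dom_expand_call_graph context_methods calls methods depth → Spec_expand_call_graph context_methods calls methods depth (expand_call_graph context_methods calls methods depth)

-- ===== LEMMAS AND PROOFS =====

-- name-level versions of A's two inner-loop bodies (state = (visited, discovered names));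
-- the queue-shaped folds of aLoop are these plus tagging, see lift_callee / lift_caller
def aCalleeN (methods : List (String × String × Int × Int × String))
    (s : List String × List String) (c : String) : List String × List String :=
  if PySem.Set.contains s.1 c then s
  else if methods.any (fun kv => kv.2.1 == c) then (PySem.Set.add s.1 c, s.2 ++ [c])
  else s

def aCallerN (m : String) (s : List String × List String) (ck : String × List String) :
    List String × List String :=
  if PySem.Set.contains ck.2 m && !PySem.Set.contains s.1 ck.1 then
    (PySem.Set.add s.1 ck.1, s.2 ++ [ck.1])
  else s

def aNodeN (calls : List (String × List String)) (methods : List (String × String × Int × Int × String))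
    (s : List String × List String) (m : String) : List String × List String :=
  calls.foldl (aCallerN m) (((PySem.Dict.mk calls).getD m []).foldl (aCalleeN methods) s)

-- A restructured into level-synchronous rounds (the bridge object: aLoop = aGrow = bGrow)
def aGrow (calls : List (String × List String)) (methods : List (String × String × Int × Int × String)) :
    Nat → List String → List String → List String
  | 0, visited, _ => visited
  | _ + 1, visited, [] => visited
  | n + 1, visited, m :: fs =>
    let s := (m :: fs).foldl (aNodeN calls methods) (visited, [])
    aGrow calls methods n s.1 s.2

-- ---- lifting: a queue-shaped fold is the name-level fold plus tagging ----

theorem lift_callee (methods : List (String × String × Int × Int × String)) (L : Int)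
    (cs : List String) : ∀ (v ns : List String) (Q0 : List (String × Int)),
    cs.foldl (aCalleeStep methods L) (v, Q0 ++ ns.map (fun x => (x, L + 1)))
      = ((cs.foldl (aCalleeN methods) (v, ns)).1,
         Q0 ++ (cs.foldl (aCalleeN methods) (v, ns)).2.map (fun x => (x, L + 1))) := by
  induction cs with
  | nil => intro v ns Q0; rfl
  | cons c cs ih =>
    intro v ns Q0
    simp only [List.foldl_cons]
    by_cases h1 : PySem.Set.contains v c = true
    · rw [show aCalleeStep methods L (v, Q0 ++ ns.map (fun x => (x, L + 1))) c
            = (v, Q0 ++ ns.map (fun x => (x, L + 1))) by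
          simp only [aCalleeStep, h1, if_true],
          show aCalleeN methods (v, ns) c = (v, ns) by
          simp only [aCalleeN, h1, if_true]]
      exact ih v ns Q0
    · rw [Bool.not_eq_true] at h1
      by_cases h2 : methods.any (fun kv => kv.2.1 == c) = true
      · rw [show aCalleeStep methods L (v, Q0 ++ ns.map (fun x => (x, L + 1))) c
              = (PySem.Set.add v c, Q0 ++ (ns ++ [c]).map (fun x => (x, L + 1))) by
            simp only [aCalleeStep, h1, h2, Bool.false_eq_true, if_false, if_true,
              List.map_append, List.map_cons, List.map_nil, List.append_assoc],
            show aCalleeN methods (v, ns) c = (PySem.Set.add v c, ns ++ [c]) by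
            simp only [aCalleeN, h1, h2, Bool.false_eq_true, if_false, if_true]]
        exact ih _ _ Q0
      · rw [show aCalleeStep methods L (v, Q0 ++ ns.map (fun x => (x, L + 1))) c
              = (v, Q0 ++ ns.map (fun x => (x, L + 1))) by
            simp only [aCalleeStep, h1, h2, Bool.false_eq_true, if_false],
            show aCalleeN methods (v, ns) c = (v, ns) by
            simp only [aCalleeN, h1, h2, Bool.false_eq_true, if_false]]
        exact ih v ns Q0

theorem lift_caller (m : String) (L : Int) :
    ∀ (entries : List (String × List String)) (v ns : List String) (Q0 : List (String × Int)),
    entries.foldl (aCallerStep m L) (v, Q0 ++ ns.map (fun x => (x, L + 1)))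
      = ((entries.foldl (aCallerN m) (v, ns)).1,
         Q0 ++ (entries.foldl (aCallerN m) (v, ns)).2.map (fun x => (x, L + 1))) := by
  intro entries
  induction entries with
  | nil => intro v ns Q0; rfl
  | cons p ps ih =>
    intro v ns Q0
    simp only [List.foldl_cons]
    by_cases h : (PySem.Set.contains p.2 m && !PySem.Set.contains v p.1) = true
    · rw [show aCallerStep m L (v, Q0 ++ ns.map (fun x => (x, L + 1))) p
            = (PySem.Set.add v p.1, Q0 ++ (ns ++ [p.1]).map (fun x => (x, L + 1))) by
          simp only [aCallerStep, h, if_true, List.map_append, List.map_cons, List.map_nil,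
            List.append_assoc],
          show aCallerN m (v, ns) p = (PySem.Set.add v p.1, ns ++ [p.1]) by
          simp only [aCallerN, h, if_true]]
      exact ih _ _ Q0
    · rw [Bool.not_eq_true] at h
      rw [show aCallerStep m L (v, Q0 ++ ns.map (fun x => (x, L + 1))) p
            = (v, Q0 ++ ns.map (fun x => (x, L + 1))) by
          simp only [aCallerStep, h, Bool.false_eq_true, if_false],
          show aCallerN m (v, ns) p = (v, ns) by
          simp only [aCallerN, h, Bool.false_eq_true, if_false]]
      exact ih v ns Q0

-- the whole body of one non-skipped aLoop iteration, in name-level terms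
theorem body_eq (calls : List (String × List String)) (methods : List (String × String × Int × Int × String))
    (m : String) (L : Int) (v ns : List String) (Q0 : List (String × Int)) :
    calls.foldl (aCallerStep m L)
      (((PySem.Dict.mk calls).getD m []).foldl (aCalleeStep methods L) (v, Q0 ++ ns.map (fun x => (x, L + 1))))
      = ((aNodeN calls methods (v, ns) m).1,
         Q0 ++ (aNodeN calls methods (v, ns) m).2.map (fun x => (x, L + 1))) := by
  rw [lift_callee, lift_caller]
  rfl

-- ---- the measure: queue length + 2 * (names from 'calls' not yet visited) ----

def uOf (calls : List (String × List String)) : List String :=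
  calls.flatMap (fun p => p.1 :: p.2)

def cntU (calls : List (String × List String)) (v : List String) : Nat :=
  (uOf calls).countP (fun y => !PySem.Set.contains v y)

theorem contains_snoc (v : List String) (c y : String) :
    PySem.Set.contains (v ++ [c]) y = (PySem.Set.contains v y || y == c) := by
  by_cases h : y = c <;> simp [PySem.Set.contains, h]

theorem cnt_snoc_aux (v : List String) (c : String) (hv : PySem.Set.contains v c = false) :
    ∀ (U : List String), c ∈ U →
    U.countP (fun y => !PySem.Set.contains (v ++ [c]) y) + 1
      ≤ U.countP (fun y => !PySem.Set.contains v y) := by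
  intro U
  induction U with
  | nil => intro hc; cases hc
  | cons u us ih =>
    intro hc
    simp only [List.countP_cons]
    have hmono : us.countP (fun y => !PySem.Set.contains (v ++ [c]) y)
        ≤ us.countP (fun y => !PySem.Set.contains v y) := by
      apply List.countP_mono_left
      intro y _ hy
      rw [contains_snoc, Bool.not_or, Bool.and_eq_true] at hy
      exact hy.1
    have hhead : (!PySem.Set.contains (v ++ [c]) u)
        = ((!PySem.Set.contains v u) && !(u == c)) := by
      rw [contains_snoc, Bool.not_or]
    by_cases hbc : (u == c) = true
    · have huc : u = c := eq_of_beq hbc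
      rw [hhead]
      have h2 : (!PySem.Set.contains v u) = true := by rw [huc, hv]; rfl
      rw [h2, hbc]
      simp only [Bool.not_true, Bool.true_and, Bool.false_eq_true, if_false, if_true]
      omega
    · have hcus : c ∈ us := by
        rcases List.mem_cons.mp hc with h | h
        · subst h; simp at hbc
        · exact h
      have hih := ih hcus
      rw [hhead, Bool.not_eq_true] at *
      rw [hbc]
      simp only [Bool.not_false, Bool.and_true]
      split_ifs <;> omega

theorem cnt_snoc (calls : List (String × List String)) (v : List String) (c : String)
    (hc : c ∈ uOf calls) (hv : PySem.Set.contains v c = false) :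
    cntU calls (v ++ [c]) + 1 ≤ cntU calls v :=
  cnt_snoc_aux v c hv (uOf calls) hc

def m2 (calls : List (String × List String)) (s : List String × List String) : Nat :=
  s.2.length + 2 * cntU calls s.1

-- every name the callee phase can add comes from 'calls'
theorem getD_mem_uOf (calls : List (String × List String)) (m x : String)
    (hx : x ∈ (PySem.Dict.mk calls).getD m []) : x ∈ uOf calls := by
  induction calls with
  | nil => simp [PySem.Dict.getD, PySem.Dict.get?] at hx
  | cons p ps ih =>
    obtain ⟨k, vv⟩ := p
    by_cases h : (k == m) = true
    · have hg : (PySem.Dict.mk ((k, vv) :: ps)).getD m [] = vv := by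
        simp [PySem.Dict.getD, PySem.Dict.get?_mk_cons, h]
      rw [hg] at hx
      exact List.mem_flatMap.mpr ⟨(k, vv), List.mem_cons_self, List.mem_cons_of_mem _ hx⟩
    · have hg : (PySem.Dict.mk ((k, vv) :: ps)).getD m [] = (PySem.Dict.mk ps).getD m [] := by
        simp [PySem.Dict.getD, PySem.Dict.get?_mk_cons, h]
      rw [hg] at hx
      have := ih hx
      simp only [uOf, List.flatMap_cons] at *
      exact List.mem_append_right _ this

-- generic: a fold whose every step is a no-op or adds one fresh 'calls'-name does not raise m2
theorem m2_foldl {α : Type} (calls : List (String × List String))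
    (g : (List String × List String) → α → (List String × List String)) (l : List α)
    (h : ∀ s x, x ∈ l → g s x = s ∨ ∃ c, c ∈ uOf calls ∧ PySem.Set.contains s.1 c = false ∧
          g s x = (s.1 ++ [c], s.2 ++ [c])) :
    ∀ s, m2 calls (l.foldl g s) ≤ m2 calls s := by
  induction l with
  | nil => intro s; exact le_refl _
  | cons x xs ih =>
    intro s
    simp only [List.foldl_cons]
    have step : m2 calls (g s x) ≤ m2 calls s := by
      rcases h s x List.mem_cons_self with he | ⟨c, hcU, hcv, he⟩
      · rw [he]
      · rw [he]
        have := cnt_snoc calls s.1 c hcU hcv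
        simp only [m2, List.length_append, List.length_cons, List.length_nil]
        omega
    exact le_trans (ih (fun s x hx => h s x (List.mem_cons_of_mem _ hx)) (g s x)) step

theorem m2_nodeN (calls : List (String × List String)) (methods : List (String × String × Int × Int × String))
    (s : List String × List String) (m : String) :
    m2 calls (aNodeN calls methods s m) ≤ m2 calls s := by
  unfold aNodeN
  have h1 : m2 calls (((PySem.Dict.mk calls).getD m []).foldl (aCalleeN methods) s) ≤ m2 calls s := by
    apply m2_foldl
    intro t c hc
    unfold aCalleeN
    by_cases hv : PySem.Set.contains t.1 c = true
    · left; simp only [hv, if_true]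
    · rw [Bool.not_eq_true] at hv
      by_cases hm : methods.any (fun kv => kv.2.1 == c) = true
      · right
        refine ⟨c, getD_mem_uOf calls m c hc, hv, ?_⟩
        rw [hv]
        simp only [Bool.false_eq_true, if_false, hm, if_true]
        rw [PySem.Set.add_of_not_mem
          (by simpa [PySem.Set.contains, List.contains_eq_mem] using hv)]
      · left
        rw [hv]
        simp only [Bool.false_eq_true, if_false, hm]
  refine le_trans (m2_foldl calls _ calls ?_ _) h1
  intro t p hp
  unfold aCallerN
  by_cases h : (PySem.Set.contains p.2 m && !PySem.Set.contains t.1 p.1) = true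
  · right
    have hv : PySem.Set.contains t.1 p.1 = false := by
      rw [Bool.and_eq_true] at h
      simpa using h.2
    refine ⟨p.1, List.mem_flatMap.mpr ⟨p, hp, List.mem_cons_self⟩, hv, ?_⟩
    rw [h]
    simp only [if_true]
    rw [PySem.Set.add_of_not_mem
      (by simpa [PySem.Set.contains, List.contains_eq_mem] using hv)]
  · left
    rw [Bool.not_eq_true] at h
    rw [h]
    simp only [Bool.false_eq_true, if_false]

theorem m2_roundFold (calls : List (String × List String)) (methods : List (String × String × Int × Int × String))
    (F : List String) : ∀ s, m2 calls (F.foldl (aNodeN calls methods) s) ≤ m2 calls s := by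
  induction F with
  | nil => intro s; exact le_refl _
  | cons m fs ih =>
    intro s
    exact le_trans (ih _) (m2_nodeN calls methods s m)

def mq (calls : List (String × List String)) (v : List String) (q : List (String × Int)) : Nat :=
  q.length + 2 * cntU calls v

-- ---- fuel irrelevance above the measure ----

theorem aLoop_nil (calls : List (String × List String)) (methods : List (String × String × Int × Int × String))
    (depth : Int) (fuel : Nat) (v : List String) : aLoop calls methods depth fuel v [] = v := by
  cases fuel <;> rfl

theorem aLoop_skip (calls : List (String × List String)) (methods : List (String × String × Int × Int × String))
    (depth : Int) (fuel : Nat) (v : List String) (m : String) (L : Int) (rest : List (String × Int))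
    (hL : depth ≤ L) :
    aLoop calls methods depth (fuel + 1) v ((m, L) :: rest) = aLoop calls methods depth fuel v rest := by
  show (if depth ≤ L then aLoop calls methods depth fuel v rest
        else aLoop calls methods depth fuel
          (calls.foldl (aCallerStep m L) (((PySem.Dict.mk calls).getD m []).foldl (aCalleeStep methods L) (v, rest))).1
          (calls.foldl (aCallerStep m L) (((PySem.Dict.mk calls).getD m []).foldl (aCalleeStep methods L) (v, rest))).2)
      = aLoop calls methods depth fuel v rest
  rw [if_pos hL]

theorem aLoop_step (calls : List (String × List String)) (methods : List (String × String × Int × Int × String))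
    (depth : Int) (fuel : Nat) (v : List String) (m : String) (L : Int) (rest : List (String × Int))
    (hL : ¬ depth ≤ L) :
    aLoop calls methods depth (fuel + 1) v ((m, L) :: rest)
      = aLoop calls methods depth fuel
          (calls.foldl (aCallerStep m L) (((PySem.Dict.mk calls).getD m []).foldl (aCalleeStep methods L) (v, rest))).1
          (calls.foldl (aCallerStep m L) (((PySem.Dict.mk calls).getD m []).foldl (aCalleeStep methods L) (v, rest))).2 := by
  show (if depth ≤ L then aLoop calls methods depth fuel v rest
        else aLoop calls methods depth fuel
          (calls.foldl (aCallerStep m L) (((PySem.Dict.mk calls).getD m []).foldl (aCalleeStep methods L) (v, rest))).1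
          (calls.foldl (aCallerStep m L) (((PySem.Dict.mk calls).getD m []).foldl (aCalleeStep methods L) (v, rest))).2)
      = _
  rw [if_neg hL]

-- entries at level ≥ depth are skipped; a queue of only such entries drains to 'visited'
theorem aLoop_drain (calls : List (String × List String)) (methods : List (String × String × Int × Int × String))
    (depth : Int) : ∀ (q : List (String × Int)) (v : List String) (fuel : Nat),
    q.length ≤ fuel → (∀ p ∈ q, depth ≤ p.2) → aLoop calls methods depth fuel v q = v := by
  intro q
  induction q with
  | nil => intro v fuel _ _; exact aLoop_nil calls methods depth fuel v
  | cons hd rest ih =>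
    intro v fuel hlen hlev
    obtain ⟨m, L⟩ := hd
    cases fuel with
    | zero => simp at hlen
    | succ fuel =>
      rw [aLoop_skip calls methods depth fuel v m L rest (hlev (m, L) List.mem_cons_self)]
      exact ih v fuel (by simpa using hlen) (fun p hp => hlev p (List.mem_cons_of_mem _ hp))

-- ---- one level-synchronous round of aLoop ----

theorem aRound (calls : List (String × List String)) (methods : List (String × String × Int × Int × String))
    (depth L : Int) (hL : L < depth) :
    ∀ (F : List String) (v ns : List String) (fuel : Nat),
    aLoop calls methods depth (fuel + F.length) v
        (F.map (fun x => (x, L)) ++ ns.map (fun x => (x, L + 1)))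
      = aLoop calls methods depth fuel (F.foldl (aNodeN calls methods) (v, ns)).1
          ((F.foldl (aNodeN calls methods) (v, ns)).2.map (fun x => (x, L + 1))) := by
  intro F
  induction F with
  | nil => intro v ns fuel; simp
  | cons m fs ih =>
    intro v ns fuel
    rw [show fuel + (m :: fs).length = (fuel + fs.length) + 1 by simp; omega]
    show aLoop calls methods depth ((fuel + fs.length) + 1) v
        ((m, L) :: (fs.map (fun x => (x, L)) ++ ns.map (fun x => (x, L + 1)))) = _
    rw [aLoop_step calls methods depth (fuel + fs.length) v m L _ (not_le.mpr hL)]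
    rw [body_eq calls methods m L v ns (fs.map (fun x => (x, L)))]
    rw [ih (aNodeN calls methods (v, ns) m).1 (aNodeN calls methods (v, ns) m).2 fuel]
    simp [List.foldl_cons]

-- ---- aLoop = aGrow ----

theorem aMain (calls : List (String × List String)) (methods : List (String × String × Int × Int × String))
    (depth : Int) : ∀ (n : Nat) (v F : List String) (fuel : Nat),
    mq calls v (F.map (fun x => (x, depth - (n : Int)))) ≤ fuel →
    aLoop calls methods depth fuel v (F.map (fun x => (x, depth - (n : Int))))
      = aGrow calls methods n v F := by
  intro n
  induction n with
  | zero =>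
    intro v F fuel hf
    rw [aLoop_drain calls methods depth _ v fuel
      (by simp only [mq, List.length_map] at hf ⊢; omega)
      (by intro p hp; rcases List.mem_map.mp hp with ⟨x, _, rfl⟩; simp)]
    rfl
  | succ n ih =>
    intro v F fuel hf
    cases F with
    | nil => simp [aGrow, aLoop_nil]
    | cons m fs =>
      have hL : depth - ((n + 1 : Nat) : Int) < depth := by push_cast; omega
      have hlen : (m :: fs).length ≤ fuel := by
        simp only [mq, List.length_map] at hf; omega
      rw [show fuel = (fuel - (m :: fs).length) + (m :: fs).length by omega,
        show (m :: fs).map (fun x => (x, depth - ((n + 1 : Nat) : Int)))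
          = (m :: fs).map (fun x => (x, depth - ((n + 1 : Nat) : Int)))
            ++ ([] : List String).map (fun x => (x, depth - ((n + 1 : Nat) : Int) + 1)) by simp,
        aRound calls methods depth _ hL (m :: fs) v [] (fuel - (m :: fs).length)]
      have hstep : depth - ((n + 1 : Nat) : Int) + 1 = depth - (n : Int) := by push_cast; omega
      rw [hstep]
      rw [ih ((m :: fs).foldl (aNodeN calls methods) (v, [])).1
        ((m :: fs).foldl (aNodeN calls methods) (v, [])).2 (fuel - (m :: fs).length) ?_]
      · rfl
      · have := m2_roundFold calls methods (m :: fs) (v, [])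
        simp only [mq, m2, List.length_map, List.length_nil] at *
        omega

-- ---- aGrow = bGrow: the precomputed structures give the same per-node steps ----

theorem names_eq (methods : List (String × String × Int × Int × String)) (c : String) :
    PySem.Set.contains (PySem.Set.ofList (methods.map (fun kv => kv.2.1))) c
      = methods.any (fun kv => kv.2.1 == c) := by
  have h1 : PySem.Set.contains (PySem.Set.ofList (methods.map (fun kv => kv.2.1))) c
      = (methods.map (fun kv => kv.2.1)).contains c := by simp [pysem]
  rw [h1, List.contains_eq_any_beq, List.any_map]
  exact PySem.List.any_congr_mem (by intro x _; simp [BEq.comm])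

theorem calleeN_eq (methods : List (String × String × Int × Int × String)) :
    aCalleeN methods = bCalleeStep (PySem.Set.ofList (methods.map (fun kv => kv.2.1))) := by
  funext s c
  unfold aCalleeN bCalleeStep
  rw [names_eq]
  by_cases h : c ∈ s.1
  · have hc : PySem.Set.contains s.1 c = true := by
      simp [PySem.Set.contains, List.contains_eq_mem, h]
    rw [hc]; simp
  · have hc : PySem.Set.contains s.1 c = false := by
      simp [PySem.Set.contains, List.contains_eq_mem, h]
    rw [hc]; simp only [Bool.not_false, Bool.true_and, Bool.false_eq_true, if_false]

theorem callersOf_getD (calls : List (String × List String)) (m : String) :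
    (buildCallersOf calls).getD m []
      = calls.flatMap (fun p => List.replicate (p.2.count m) p.1) := by
  unfold buildCallersOf
  have h : calls.foldl (fun d p => p.2.foldl (fun d c => d.modify c [] (fun v => v ++ [p.1])) d) PySem.Dict.empty
      = (calls.flatMap (fun p => p.2.map (fun c => (c, p.1)))).foldl
          (fun d pr => d.modify pr.1 [] (fun v => v ++ [pr.2])) PySem.Dict.empty := by
    rw [List.foldl_flatMap]
    simp [List.foldl_map]
  rw [h, PySem.Dict.getD_foldl_modify_append, PySem.Dict.getD_empty]
  simp only [List.filter_flatMap, List.map_flatMap, List.nil_append]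
  congr 1
  funext p
  simp [Function.comp_def, List.filter_map, List.map_const', List.countP_eq_length_filter, List.count]

theorem bCallerStep_mem (s : List String × List String) (x : String)
    (h : x ∈ s.1) : bCallerStep s x = s := by
  unfold bCallerStep
  have hc : PySem.Set.contains s.1 x = true := by
    simp [PySem.Set.contains, List.contains_eq_mem, h]
  rw [hc]; simp

theorem bCallerStep_not_mem (s : List String × List String) (x : String)
    (h : x ∉ s.1) : bCallerStep s x = (s.1 ++ [x], s.2 ++ [x]) := by
  unfold bCallerStep
  have hc : PySem.Set.contains s.1 x = false := by
    simp [PySem.Set.contains, List.contains_eq_mem, h]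
  rw [hc]
  simp [PySem.Set.add, PySem.Set.contains, List.contains_eq_mem, h]

theorem bCallerStep_foldl_mem (x : String) (n : Nat)
    (s : List String × List String) (h : x ∈ s.1) :
    (List.replicate n x).foldl bCallerStep s = s := by
  induction n with
  | zero => rfl
  | succ n ih => rw [List.replicate_succ, List.foldl_cons, bCallerStep_mem s x h, ih]

theorem chunk_foldl_eq (m : String) (p : String × List String)
    (s : List String × List String) :
    (List.replicate (p.2.count m) p.1).foldl bCallerStep s = aCallerN m s p := by
  unfold aCallerN
  by_cases hm : m ∈ p.2
  · have hck : PySem.Set.contains p.2 m = true := by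
      simp [PySem.Set.contains, List.contains_eq_mem, hm]
    rw [hck]
    obtain ⟨n, hn⟩ : ∃ n, p.2.count m = n + 1 := by
      have := List.count_pos_iff.mpr hm
      exact ⟨p.2.count m - 1, by omega⟩
    rw [hn, List.replicate_succ, List.foldl_cons]
    by_cases hv : p.1 ∈ s.1
    · have hc1 : PySem.Set.contains s.1 p.1 = true := by
        simp [PySem.Set.contains, List.contains_eq_mem, hv]
      rw [bCallerStep_mem s p.1 hv, bCallerStep_foldl_mem p.1 n s hv, hc1]
      simp
    · have hc0 : PySem.Set.contains s.1 p.1 = false := by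
        simp [PySem.Set.contains, List.contains_eq_mem, hv]
      rw [bCallerStep_not_mem s p.1 hv,
        bCallerStep_foldl_mem p.1 n _ (by simp), hc0]
      simp [PySem.Set.add, PySem.Set.contains, List.contains_eq_mem, hv]
  · have hck : PySem.Set.contains p.2 m = false := by
      simp [PySem.Set.contains, List.contains_eq_mem, hm]
    have hcnt : p.2.count m = 0 := by
      simp [List.count_eq_zero, hm]
    rw [hcnt, hck]
    simp

theorem callerPhase_eq (calls : List (String × List String)) (m : String)
    (s : List String × List String) :
    calls.foldl (aCallerN m) s
      = ((buildCallersOf calls).getD m []).foldl bCallerStep s := by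
  rw [callersOf_getD, List.foldl_flatMap]
  exact PySem.List.foldl_congr_mem calls _ _ s (fun acc p _ => (chunk_foldl_eq m p acc).symm)

theorem nodeN_eq (calls : List (String × List String)) (methods : List (String × String × Int × Int × String)) :
    aNodeN calls methods
      = bNodeStep calls (PySem.Set.ofList (methods.map (fun kv => kv.2.1))) (buildCallersOf calls) := by
  funext s m
  unfold aNodeN bNodeStep
  rw [calleeN_eq, callerPhase_eq]

theorem grow_eq (calls : List (String × List String)) (methods : List (String × String × Int × Int × String)) :
    ∀ (n : Nat) (v F : List String),
    aGrow calls methods n v F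
      = bGrow calls (PySem.Set.ofList (methods.map (fun kv => kv.2.1))) (buildCallersOf calls) n v F := by
  intro n
  induction n with
  | zero => intro v F; rfl
  | succ n ih =>
    intro v F
    cases F with
    | nil => rfl
    | cons m fs =>
      show aGrow calls methods (n + 1) v (m :: fs) = _
      unfold aGrow bGrow
      rw [nodeN_eq, ih]

-- ===== VERDICT (by name: the statement is the Claim_ definition above) =====
theorem expand_call_graph_spec : Claim_equal_expand_call_graph := by
  intro context_methods calls methods depth _
  unfold Spec_expand_call_graph expand_call_graph expand_call_graph_alt
  rw [← grow_eq]
  by_cases hd : depth ≤ 0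
  · rw [aLoop_drain calls methods depth _ _ _
      (by simp [pvFuel]; omega)
      (by intro p hp; rcases List.mem_map.mp hp with ⟨x, _, rfl⟩; simpa using hd),
      show depth.toNat = 0 by omega]
    rfl
  · have hz : (0 : Int) = depth - (depth.toNat : Int) := by omega
    rw [show context_methods.map (fun m => (m, (0 : Int)))
        = context_methods.map (fun m => (m, depth - (depth.toNat : Int))) by rw [← hz]]
    apply aMain
    have hcnt : cntU calls (PySem.Set.ofList context_methods) ≤ (uOf calls).length :=
      List.countP_le_length
    simp only [mq, List.length_map, pvFuel, uOf] at *
    omega
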